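-- pv_equiv track=rewrite | github.com/csmartin6/adventofcode2023 | day_18.py | fill_trench
-- ===== SOURCE A (Python) =====
-- def fill_trench(trench_boundary):
--     i_min = min([p[0] for p in trench_boundary])
--     i_max = max([p[0] for p in trench_boundary])
--     j_min = min([p[1] for p in trench_boundary])
--     j_max = max([p[1] for p in trench_boundary])
--
--     filled = set(trench_boundary)
--
--     for i in range(i_min, i_max + 1):
--         for j in range(j_min, j_max+1):
--             if (i,j) not in trench_boundary:
--                 # check left
--                 crossings_left = 0
--                 for k in range(j - 1, j_min-1, -1):
--                     if (i, k) in trench_boundary: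
--                         crossings_left += 1
--
--                 # check right
--                 crossings_right = 0
--                 for k in range(j + 1, j_max+1):
--                     if (i, k) in trench_boundary:
--                         crossings_right += 1
--
--                 # check up
--                 crossings_up = 0
--                 for k in range(i - 1, i_min-1, -1):
--                     if (k, j) in trench_boundary:
--                         crossings_up += 1
--
--                 # check down
--                 crossings_down = 0
--                 for k in range(i + 1, i_max+1):
--                     if (k, j) in trench_boundary:
--                         crossings_down += 1
--
--                 if all([
--                     crossings_left != 0,
--                     crossings_right != 0,
--                     crossings_up != 0,
--                     crossings_down != 0,
--                 ]):
--                     filled.add((i,j))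
--
--     return filled
-- ===== SOURCE B (Python) =====
-- def fill_trench(trench_boundary):
--     # Precompute per-row min/max boundary column and per-column min/max boundary row,
--     # then test each cell of the bounding box in O(1).
--     rmin = {}; rmax = {}; cmin = {}; cmax = {}
--     for i, j in trench_boundary:
--         rmin[i] = min(rmin.get(i, j), j)
--         rmax[i] = max(rmax.get(i, j), j)
--         cmin[j] = min(cmin.get(j, i), i)
--         cmax[j] = max(cmax.get(j, i), i)
--     i_min = min(p[0] for p in trench_boundary)
--     i_max = max(p[0] for p in trench_boundary)
--     j_min = min(p[1] for p in trench_boundary)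
--     j_max = max(p[1] for p in trench_boundary)
--     boundary = set(trench_boundary)
--     filled = set(trench_boundary)
--     for i in range(i_min, i_max + 1):
--         for j in range(j_min, j_max + 1):
--             if (i, j) not in boundary:
--                 lo = rmin.get(i); hi = rmax.get(i)
--                 up = cmin.get(j); dn = cmax.get(j)
--                 if (lo is not None and hi is not None and up is not None
--                         and dn is not None and lo < j < hi and up < i < dn):
--                     filled.add((i, j))
--     return filled
-- ===== Notes on version B (the rewrite author's own statement) =====
-- stated objective: faster
-- what changed: Instead of scanning left/right/up/down through the whole bounding box with an O(N) list-membership test at every step, B precomputes per-row min/max boundary column and per-column min/max boundary row in one pass over the boundary plus a hash set for membership, making the per-cell interior test O(1).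
import Mathlib
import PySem

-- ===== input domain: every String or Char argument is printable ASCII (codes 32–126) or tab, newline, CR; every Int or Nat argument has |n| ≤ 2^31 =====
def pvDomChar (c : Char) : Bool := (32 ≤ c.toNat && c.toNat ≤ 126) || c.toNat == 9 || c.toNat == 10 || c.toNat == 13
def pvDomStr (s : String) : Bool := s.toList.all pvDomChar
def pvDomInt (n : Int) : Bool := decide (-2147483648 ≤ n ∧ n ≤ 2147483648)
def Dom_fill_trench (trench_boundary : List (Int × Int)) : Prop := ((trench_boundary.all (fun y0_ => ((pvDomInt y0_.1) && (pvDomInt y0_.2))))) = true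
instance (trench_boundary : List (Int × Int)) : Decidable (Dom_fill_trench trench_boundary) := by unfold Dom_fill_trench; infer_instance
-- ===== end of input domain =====

-- B replaces A's four per-cell directional scans (each with a linear list-membership test)
-- by precomputed per-row / per-column boundary extrema and a set for membership: O(1) per cell.


-- ===== PORT A =====
def fill_trench (trench_boundary : List (Int × Int)) : List (Int × Int) :=
  match PySem.List.min? (trench_boundary.map (fun p => p.1)) (fun y => y),
        PySem.List.max? (trench_boundary.map (fun p => p.1)) (fun y => y),
        PySem.List.min? (trench_boundary.map (fun p => p.2)) (fun y => y),
        PySem.List.max? (trench_boundary.map (fun p => p.2)) (fun y => y) with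
  | some i_min, some i_max, some j_min, some j_max =>
      (PySem.List.pyRange i_min (i_max + 1) 1).foldl (fun filled i =>
        (PySem.List.pyRange j_min (j_max + 1) 1).foldl (fun filled j =>
          if (i, j) ∈ trench_boundary then filled
          else
            let crossings_left :=
              (PySem.List.pyRange (j - 1) (j_min - 1) (-1)).foldl
                (fun c k => if (i, k) ∈ trench_boundary then c + 1 else c) (0 : Int)
            let crossings_right :=
              (PySem.List.pyRange (j + 1) (j_max + 1) 1).foldl
                (fun c k => if (i, k) ∈ trench_boundary then c + 1 else c) (0 : Int)
            let crossings_up :=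
              (PySem.List.pyRange (i - 1) (i_min - 1) (-1)).foldl
                (fun c k => if (k, j) ∈ trench_boundary then c + 1 else c) (0 : Int)
            let crossings_down :=
              (PySem.List.pyRange (i + 1) (i_max + 1) 1).foldl
                (fun c k => if (k, j) ∈ trench_boundary then c + 1 else c) (0 : Int)
            if crossings_left ≠ 0 ∧ crossings_right ≠ 0 ∧ crossings_up ≠ 0 ∧ crossings_down ≠ 0
            then PySem.Set.add filled (i, j) else filled)
          filled)
        (PySem.Set.ofList trench_boundary)
  | _, _, _, _ => []    -- unreachable under Pre_: Python raises ValueError (min of empty) there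

-- ===== PORT B =====
def fill_trench_alt (trench_boundary : List (Int × Int)) : List (Int × Int) :=
  let rmin := trench_boundary.foldl
    (fun d p => d.insert p.1 (min (d.getD p.1 p.2) p.2)) (PySem.Dict.empty : PySem.Dict Int Int)
  let rmax := trench_boundary.foldl
    (fun d p => d.insert p.1 (max (d.getD p.1 p.2) p.2)) (PySem.Dict.empty : PySem.Dict Int Int)
  let cmin := trench_boundary.foldl
    (fun d p => d.insert p.2 (min (d.getD p.2 p.1) p.1)) (PySem.Dict.empty : PySem.Dict Int Int)
  let cmax := trench_boundary.foldl
    (fun d p => d.insert p.2 (max (d.getD p.2 p.1) p.1)) (PySem.Dict.empty : PySem.Dict Int Int)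
  -- the four min/max of a nonempty list; Python raises ValueError on [] (outside Pre_), giving []
  (PySem.List.min? (trench_boundary.map (fun p => p.1)) (fun y => y)).elim [] (fun i_min =>
  (PySem.List.max? (trench_boundary.map (fun p => p.1)) (fun y => y)).elim [] (fun i_max =>
  (PySem.List.min? (trench_boundary.map (fun p => p.2)) (fun y => y)).elim [] (fun j_min =>
  (PySem.List.max? (trench_boundary.map (fun p => p.2)) (fun y => y)).elim [] (fun j_max =>
    let boundary := PySem.Set.ofList trench_boundary
    (PySem.List.pyRange i_min (i_max + 1) 1).foldl (fun filled i =>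
      (PySem.List.pyRange j_min (j_max + 1) 1).foldl (fun filled j =>
        if PySem.Set.contains boundary (i, j) then filled
        else
          -- lo/hi/up/dn = rmin.get(i)/rmax.get(i)/cmin.get(j)/cmax.get(j); all-present test + O(1) comparisons
          (rmin.get? i).elim filled (fun lo =>
          (rmax.get? i).elim filled (fun hi =>
          (cmin.get? j).elim filled (fun up =>
          (cmax.get? j).elim filled (fun dn =>
            if lo < j ∧ j < hi ∧ up < i ∧ i < dn
            then PySem.Set.add filled (i, j) else filled)))))
        filled)
      (PySem.Set.ofList trench_boundary)))))

-- ===== PRECONDITION & SPEC =====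
-- Pre_ excludes only the empty boundary list, on which Python A raises ValueError (min of an empty list).
def Pre_fill_trench (trench_boundary : List (Int × Int)) : Prop := trench_boundary ≠ []
instance (trench_boundary : List (Int × Int)) : Decidable (Pre_fill_trench trench_boundary) := by unfold Pre_fill_trench; infer_instance
def pvWitness_fill_trench : (List (Int × Int)) := [(0, 0), (0, 2), (1, 1), (-1, 1)]
def Spec_fill_trench (trench_boundary : List (Int × Int)) (out : List (Int × Int)) : Prop := out = fill_trench_alt trench_boundary
instance (trench_boundary : List (Int × Int)) (out : List (Int × Int)) : Decidable (Spec_fill_trench trench_boundary out) := by unfold Spec_fill_trench; infer_instance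

-- ===== CLAIM (what is proved, stated in full; the proofs are below) =====
def Claim_equal_fill_trench : Prop := ∀ (trench_boundary : List (Int × Int)), Dom_fill_trench trench_boundary → Pre_fill_trench trench_boundary → Spec_fill_trench trench_boundary (fill_trench trench_boundary)

-- ===== LEMMAS AND PROOFS =====

-- the dict built by the min/max-update loop, looked up at x, is the fold of op over the matching values
theorem dictFold_get? (op : Int → Int → Int)
    (key val : Int × Int → Int) (l : List (Int × Int)) (d : PySem.Dict Int Int) (x : Int) :
    (l.foldl (fun d p => d.insert (key p) (op (d.getD (key p) (val p)) (val p))) d).get? x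
      = ((l.filter (fun p => key p == x)).map val).foldl
          (fun o v => some (op (o.getD v) v)) (d.get? x) := by
  induction l generalizing d with
  | nil => rfl
  | cons p t ih =>
    simp only [List.foldl_cons, List.filter_cons]
    rw [ih]
    by_cases hx : key p = x
    · subst hx
      simp [PySem.Dict.get?_insert_self, PySem.Dict.getD_eq_get?_getD]
    · have hbe : (key p == x) = false := by simp [hx]
      rw [hbe]
      simp only [Bool.false_eq_true, if_false]
      rw [PySem.Dict.get?_insert_of_ne _ _ (fun h => hx h.symm)]

theorem optfold_some (t : List Int) (op : Int → Int → Int) (a : Int) :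
    t.foldl (fun o v => some (op (o.getD v) v)) (some a) = some (t.foldl op a) := by
  induction t generalizing a with
  | nil => rfl
  | cons v t ih => simp [ih]

theorem optfold_min (vs : List Int) :
    vs.foldl (fun o v => some (min (o.getD v) v)) none = PySem.List.min? vs (fun y => y) := by
  cases vs with
  | nil => rfl
  | cons v t =>
    rw [PySem.List.min?_id_cons]
    simpa [min_self] using optfold_some t min v

theorem optfold_max (vs : List Int) :
    vs.foldl (fun o v => some (max (o.getD v) v)) none = PySem.List.max? vs (fun y => y) := by
  cases vs with
  | nil => rfl
  | cons v t =>
    rw [PySem.List.max?_id_cons]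
    simpa [max_self] using optfold_some t max v

-- a directional count is nonzero iff some boundary value lies strictly on that side
theorem count_ne_zero_iff (l : List Int) (P : Int → Prop) [DecidablePred P] :
    (l.foldl (fun c k => if P k then c + 1 else c) (0 : Int)) ≠ 0 ↔ ∃ k ∈ l, P k := by
  rw [PySem.List.foldl_ite_add_one,
    show ((0 : Int) + ((l.countP fun k => decide (P k) : Nat) : Int) ≠ 0
        ↔ 0 < l.countP fun k => decide (P k)) by omega]
  simp [List.countP_pos_iff]

-- min side: some value < j exists iff the minimum exists and is < j
theorem exists_lt_iff_min (vs : List Int) (j g : Int) (hg : ∀ v ∈ vs, g ≤ v) :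
    (∃ k, k ∈ vs ∧ g - 1 < k ∧ k ≤ j - 1)
      ↔ (∃ m, PySem.List.min? vs (fun y => y) = some m ∧ m < j) := by
  constructor
  · rintro ⟨k, hk, -, hkj⟩
    cases hmin : PySem.List.min? vs (fun y => y) with
    | none => exact absurd ((PySem.List.min?_eq_none_iff _ _).mp hmin) (by rintro rfl; exact List.not_mem_nil hk)
    | some m =>
      exact ⟨m, rfl, lt_of_le_of_lt (PySem.List.min?_isMin hmin k hk) (by omega)⟩
  · rintro ⟨m, hmin, hmj⟩
    exact ⟨m, PySem.List.min?_mem hmin,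
      by have := hg m (PySem.List.min?_mem hmin); omega, by omega⟩

-- max side: some value > j exists iff the maximum exists and is > j
theorem exists_gt_iff_max (vs : List Int) (j g : Int) (hg : ∀ v ∈ vs, v ≤ g) :
    (∃ k, k ∈ vs ∧ j + 1 ≤ k ∧ k < g + 1)
      ↔ (∃ m, PySem.List.max? vs (fun y => y) = some m ∧ j < m) := by
  constructor
  · rintro ⟨k, hk, hkj, -⟩
    cases hmax : PySem.List.max? vs (fun y => y) with
    | none => exact absurd ((PySem.List.max?_eq_none_iff _ _).mp hmax) (by rintro rfl; exact List.not_mem_nil hk)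
    | some m =>
      exact ⟨m, rfl, lt_of_lt_of_le (by omega) (PySem.List.max?_isMax hmax k hk)⟩
  · rintro ⟨m, hmax, hmj⟩
    exact ⟨m, PySem.List.max?_mem hmax, by omega,
      by have := hg m (PySem.List.max?_mem hmax); omega⟩

theorem mem_rowVals (tb : List (Int × Int)) (i k : Int) :
    k ∈ (tb.filter (fun p => p.1 == i)).map (fun p => p.2) ↔ (i, k) ∈ tb := by
  simp only [List.mem_map, List.mem_filter, beq_iff_eq]
  constructor
  · rintro ⟨⟨a, b⟩, ⟨hm, rfl⟩, rfl⟩; exact hm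
  · intro h; exact ⟨(i, k), ⟨h, rfl⟩, rfl⟩

theorem mem_colVals (tb : List (Int × Int)) (j k : Int) :
    k ∈ (tb.filter (fun p => p.2 == j)).map (fun p => p.1) ↔ (k, j) ∈ tb := by
  simp only [List.mem_map, List.mem_filter, beq_iff_eq]
  constructor
  · rintro ⟨⟨a, b⟩, ⟨hm, rfl⟩, rfl⟩; exact hm
  · intro h; exact ⟨(k, j), ⟨h, rfl⟩, rfl⟩

-- ===== VERDICT =====
theorem fill_trench_spec : Claim_equal_fill_trench := by
  intro tb _hdom _hpre
  unfold Spec_fill_trench fill_trench fill_trench_alt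
  cases himin : PySem.List.min? (tb.map (fun p => p.1)) (fun y => y) with
  | none => cases himax : PySem.List.max? (tb.map (fun p => p.1)) (fun y => y) <;>
            cases hjmin : PySem.List.min? (tb.map (fun p => p.2)) (fun y => y) <;>
            cases hjmax : PySem.List.max? (tb.map (fun p => p.2)) (fun y => y) <;> rfl
  | some i_min =>
  cases himax : PySem.List.max? (tb.map (fun p => p.1)) (fun y => y) with
  | none =>  cases hjmin : PySem.List.min? (tb.map (fun p => p.2)) (fun y => y) <;>
             cases hjmax : PySem.List.max? (tb.map (fun p => p.2)) (fun y => y) <;> rfl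
  | some i_max =>
  cases hjmin : PySem.List.min? (tb.map (fun p => p.2)) (fun y => y) with
  | none => cases hjmax : PySem.List.max? (tb.map (fun p => p.2)) (fun y => y) <;> rfl
  | some j_min =>
  cases hjmax : PySem.List.max? (tb.map (fun p => p.2)) (fun y => y) with
  | none => rfl
  | some j_max =>
  simp only
  -- global bounds
  have hgi : ∀ v ∈ tb.map (fun p => p.1), i_min ≤ v := PySem.List.min?_isMin himin
  have hgI : ∀ v ∈ tb.map (fun p => p.1), v ≤ i_max := PySem.List.max?_isMax himax
  have hgj : ∀ v ∈ tb.map (fun p => p.2), j_min ≤ v := PySem.List.min?_isMin hjmin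
  have hgJ : ∀ v ∈ tb.map (fun p => p.2), v ≤ j_max := PySem.List.max?_isMax hjmax
  apply PySem.List.foldl_congr_mem
  intro acc i _
  apply PySem.List.foldl_congr_mem
  intro acc j _
  -- the skip test
  rw [show PySem.Set.contains (PySem.Set.ofList tb) (i, j) = decide ((i, j) ∈ tb) by
        simp [PySem.Set.contains, PySem.Set.mem_ofList]]
  by_cases hmem : (i, j) ∈ tb
  · simp [hmem]
  · simp only [hmem, decide_false, Bool.false_eq_true, if_false]
    -- rewrite the four dict lookups into min?/max? of the row/column value lists
    rw [dictFold_get? min (fun p => p.1) (fun p => p.2) tb _ i,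
        dictFold_get? max (fun p => p.1) (fun p => p.2) tb _ i,
        dictFold_get? min (fun p => p.2) (fun p => p.1) tb _ j,
        dictFold_get? max (fun p => p.2) (fun p => p.1) tb _ j]
    simp only [PySem.Dict.get?_empty, optfold_min, optfold_max]
    -- A's four counts as existence statements
    have hrow : ∀ v ∈ (tb.filter (fun p => p.1 == i)).map (fun p => p.2),
        j_min ≤ v ∧ v ≤ j_max := by
      intro v hv
      rw [mem_rowVals] at hv
      exact ⟨hgj v (List.mem_map.mpr ⟨(i, v), hv, rfl⟩),
        hgJ v (List.mem_map.mpr ⟨(i, v), hv, rfl⟩)⟩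
    have hcol : ∀ v ∈ (tb.filter (fun p => p.2 == j)).map (fun p => p.1),
        i_min ≤ v ∧ v ≤ i_max := by
      intro v hv
      rw [mem_colVals] at hv
      exact ⟨hgi v (List.mem_map.mpr ⟨(v, j), hv, rfl⟩),
        hgI v (List.mem_map.mpr ⟨(v, j), hv, rfl⟩)⟩
    have hL : ((PySem.List.pyRange (j - 1) (j_min - 1) (-1)).foldl
          (fun c k => if (i, k) ∈ tb then c + 1 else c) (0 : Int)) ≠ 0
        ↔ (∃ m, PySem.List.min? ((tb.filter (fun p => p.1 == i)).map (fun p => p.2))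
              (fun y => y) = some m ∧ m < j) := by
      rw [count_ne_zero_iff, ← exists_lt_iff_min _ j (j_min) (fun v hv => (hrow v hv).1)]
      constructor
      · rintro ⟨k, hk, hP⟩
        rw [PySem.List.mem_pyRange_neg_one] at hk
        exact ⟨k, (mem_rowVals tb i k).mpr hP, by omega, by omega⟩
      · rintro ⟨k, hk, h1, h2⟩
        exact ⟨k, PySem.List.mem_pyRange_neg_one.mpr (by omega), (mem_rowVals tb i k).mp hk⟩
    have hR : ((PySem.List.pyRange (j + 1) (j_max + 1) 1).foldl
          (fun c k => if (i, k) ∈ tb then c + 1 else c) (0 : Int)) ≠ 0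
        ↔ (∃ m, PySem.List.max? ((tb.filter (fun p => p.1 == i)).map (fun p => p.2))
              (fun y => y) = some m ∧ j < m) := by
      rw [count_ne_zero_iff, ← exists_gt_iff_max _ j (j_max) (fun v hv => (hrow v hv).2)]
      constructor
      · rintro ⟨k, hk, hP⟩
        rw [PySem.List.mem_pyRange_one] at hk
        exact ⟨k, (mem_rowVals tb i k).mpr hP, by omega, by omega⟩
      · rintro ⟨k, hk, h1, h2⟩
        exact ⟨k, PySem.List.mem_pyRange_one.mpr (by omega), (mem_rowVals tb i k).mp hk⟩
    have hU : ((PySem.List.pyRange (i - 1) (i_min - 1) (-1)).foldl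
          (fun c k => if (k, j) ∈ tb then c + 1 else c) (0 : Int)) ≠ 0
        ↔ (∃ m, PySem.List.min? ((tb.filter (fun p => p.2 == j)).map (fun p => p.1))
              (fun y => y) = some m ∧ m < i) := by
      rw [count_ne_zero_iff, ← exists_lt_iff_min _ i (i_min) (fun v hv => (hcol v hv).1)]
      constructor
      · rintro ⟨k, hk, hP⟩
        rw [PySem.List.mem_pyRange_neg_one] at hk
        exact ⟨k, (mem_colVals tb j k).mpr hP, by omega, by omega⟩
      · rintro ⟨k, hk, h1, h2⟩
        exact ⟨k, PySem.List.mem_pyRange_neg_one.mpr (by omega), (mem_colVals tb j k).mp hk⟩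
    have hD : ((PySem.List.pyRange (i + 1) (i_max + 1) 1).foldl
          (fun c k => if (k, j) ∈ tb then c + 1 else c) (0 : Int)) ≠ 0
        ↔ (∃ m, PySem.List.max? ((tb.filter (fun p => p.2 == j)).map (fun p => p.1))
              (fun y => y) = some m ∧ i < m) := by
      rw [count_ne_zero_iff, ← exists_gt_iff_max _ i (i_max) (fun v hv => (hcol v hv).2)]
      constructor
      · rintro ⟨k, hk, hP⟩
        rw [PySem.List.mem_pyRange_one] at hk
        exact ⟨k, (mem_colVals tb j k).mpr hP, by omega, by omega⟩
      · rintro ⟨k, hk, h1, h2⟩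
        exact ⟨k, PySem.List.mem_pyRange_one.mpr (by omega), (mem_colVals tb j k).mp hk⟩
    -- both sides are now a condition on the same min?/max? values
    cases hA : PySem.List.min? ((tb.filter (fun p => p.1 == i)).map (fun p => p.2)) (fun y => y) with
    | none =>
      simp only [Option.elim_none, Option.elim_some]
      rw [if_neg]
      rintro ⟨h1, -⟩
      rw [hL] at h1
      rcases h1 with ⟨m, hm, -⟩
      rw [hA] at hm; cases hm
    | some lo =>
    cases hB : PySem.List.max? ((tb.filter (fun p => p.1 == i)).map (fun p => p.2)) (fun y => y) with
    | none =>
      simp only [Option.elim_none, Option.elim_some]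
      rw [if_neg]
      rintro ⟨-, h2, -⟩
      rw [hR] at h2
      rcases h2 with ⟨m, hm, -⟩
      rw [hB] at hm; cases hm
    | some hi =>
    cases hC : PySem.List.min? ((tb.filter (fun p => p.2 == j)).map (fun p => p.1)) (fun y => y) with
    | none =>
      simp only [Option.elim_none, Option.elim_some]
      rw [if_neg]
      rintro ⟨-, -, h3, -⟩
      rw [hU] at h3
      rcases h3 with ⟨m, hm, -⟩
      rw [hC] at hm; cases hm
    | some up =>
    cases hE : PySem.List.max? ((tb.filter (fun p => p.2 == j)).map (fun p => p.1)) (fun y => y) with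
    | none =>
      simp only [Option.elim_none, Option.elim_some]
      rw [if_neg]
      rintro ⟨-, -, -, h4⟩
      rw [hD] at h4
      rcases h4 with ⟨m, hm, -⟩
      rw [hE] at hm; cases hm
    | some dn =>
      simp only [Option.elim_some]
      apply if_congr _ rfl rfl
      rw [hA] at hL; rw [hB] at hR; rw [hC] at hU; rw [hE] at hD
      simp only [Option.some_inj] at hL hR hU hD
      constructor <;> intro h
      · exact ⟨by rcases (hL.mp h.1) with ⟨m, rfl, hm⟩; exact hm,
               by rcases (hR.mp h.2.1) with ⟨m, rfl, hm⟩; exact hm,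
               by rcases (hU.mp h.2.2.1) with ⟨m, rfl, hm⟩; exact hm,
               by rcases (hD.mp h.2.2.2) with ⟨m, rfl, hm⟩; exact hm⟩
      · exact ⟨hL.mpr ⟨lo, rfl, h.1⟩, hR.mpr ⟨hi, rfl, h.2.1⟩,
               hU.mpr ⟨up, rfl, h.2.2.1⟩, hD.mpr ⟨dn, rfl, h.2.2.2⟩⟩
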